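-- pv_equiv track=rewrite | github.com/firewalleagle/Finder | bot.py | detect_indian_operator
-- ===== SOURCE A (Python) =====
-- def detect_indian_operator(number):
--     """Detect Indian telecom operator based on number prefix."""
--     # Remove country code
--     num = number.replace('+91', '').replace('91', '')
--
--     if len(num) < 10:
--         return "Unknown"
--
--     first_four = num[:4]
--
--     # Operator detection based on prefixes
--     operator_prefixes = {
--         'AIRTEL': ['9810', '9811', '9812', '9813', '9814', '9815', '9816', '9817',
--                   '9818', '9819', '9800', '9801', '9802', '9803', '9804', '9805'],
--         'JIO': ['7011', '7010', '7012', '7013', '7014', '7015', '7016', '7017',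
--                '7018', '7019', '7000', '7001', '7002', '7003', '7004', '7005'],
--         'VI': ['9890', '9891', '9892', '9893', '9894', '9895', '9896', '9897',
--               '9898', '9899', '9999', '9998', '9997', '9996', '9995', '9994'],
--         'BSNL': ['9440', '9441', '9442', '9443', '9444', '9445', '9446', '9447',
--                 '9448', '9449', '9450', '9451', '9452', '9453', '9454', '9455'],
--     }
--
--     for operator, prefixes in operator_prefixes.items():
--         for prefix in prefixes:
--             if first_four.startswith(prefix):
--                 return operator
--
--     return "Unknown"
-- ===== SOURCE B (Python) =====
-- def detect_indian_operator(number):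
--     """Detect Indian telecom operator based on number prefix."""
--     # Remove country code
--     num = number.replace('+91', '').replace('91', '')
--
--     if len(num) < 10:
--         return "Unknown"
--
--     # Decide arithmetically on the digit groups instead of scanning prefix lists:
--     # every operator's prefixes are '<3-digit head><last digit in a range>'.
--     head = num[:3]
--     d = num[3]
--     if not ('0' <= d <= '9'):
--         return "Unknown"
--     low = d <= '5'
--     if head == '981' or (head == '980' and low):
--         return "AIRTEL"
--     if head == '701' or (head == '700' and low):
--         return "JIO"
--     if head == '989' or (head == '999' and d >= '4'):
--         return "VI"
--     if head == '944' or (head == '945' and low):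
--         return "BSNL"
--     return "Unknown"
-- ===== Notes on version B (the rewrite author's own statement) =====
-- stated objective: simpler
-- what changed: Replaces the nested loop over four 16-element prefix lists (64 startswith tests) with a loop-free, table-free decision: compare the 3-character head num[:3] and the fourth digit's range, exploiting that every prefix list is a contiguous digit range under a fixed 3-digit head.
import Mathlib
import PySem

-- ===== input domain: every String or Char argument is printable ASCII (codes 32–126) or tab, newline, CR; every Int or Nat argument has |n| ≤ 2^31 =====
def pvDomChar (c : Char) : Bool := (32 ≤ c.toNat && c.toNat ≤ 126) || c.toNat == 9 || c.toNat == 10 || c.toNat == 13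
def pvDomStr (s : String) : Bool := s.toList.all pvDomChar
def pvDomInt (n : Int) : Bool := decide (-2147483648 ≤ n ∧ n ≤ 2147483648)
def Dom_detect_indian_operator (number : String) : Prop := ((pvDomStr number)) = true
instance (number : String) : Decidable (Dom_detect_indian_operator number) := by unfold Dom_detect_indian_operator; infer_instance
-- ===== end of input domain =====

-- B replaces A's nested scan over four 16-element prefix lists by a loop-free decision on
-- the first three characters and the fourth character's digit range (objective: simpler).


-- ===== PORT A =====
-- the dict literal 'operator_prefixes' (iterated in insertion order, key → prefix list)
def pvOpPrefixes : List (String × List String) :=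
  [("AIRTEL", ["9810", "9811", "9812", "9813", "9814", "9815", "9816", "9817",
               "9818", "9819", "9800", "9801", "9802", "9803", "9804", "9805"]),
   ("JIO",    ["7011", "7010", "7012", "7013", "7014", "7015", "7016", "7017",
               "7018", "7019", "7000", "7001", "7002", "7003", "7004", "7005"]),
   ("VI",     ["9890", "9891", "9892", "9893", "9894", "9895", "9896", "9897",
               "9898", "9899", "9999", "9998", "9997", "9996", "9995", "9994"]),
   ("BSNL",   ["9440", "9441", "9442", "9443", "9444", "9445", "9446", "9447",
               "9448", "9449", "9450", "9451", "9452", "9453", "9454", "9455"])]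

-- the inner loop 'for prefix in prefixes: if first_four.startswith(prefix): return operator'
def pvScanInner (ff : String) (op : String) : List String → Option String
  | [] => none
  | p :: ps => if PySem.Str.startswith ff p then some op else pvScanInner ff op ps

-- the outer loop 'for operator, prefixes in operator_prefixes.items(): …'
def pvScanOuter (ff : String) : List (String × List String) → Option String
  | [] => none
  | (op, ps) :: rest =>
      match pvScanInner ff op ps with
      | some r => some r
      | none => pvScanOuter ff rest

def detect_indian_operator (number : String) : String :=
  let num := PySem.Str.replace (PySem.Str.replace number "+91" "") "91" ""
  if PySem.Str.len num < 10 then "Unknown"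
  else
    let first_four := PySem.Str.slice num none (some 4)
    match pvScanOuter first_four pvOpPrefixes with
    | some op => op
    | none => "Unknown"

-- ===== PORT B =====
def detect_indian_operator_alt (number : String) : String :=
  let num := PySem.Str.replace (PySem.Str.replace number "+91" "") "91" ""
  if PySem.Str.len num < 10 then "Unknown"
  else
    let head := PySem.Str.slice num none (some 3)
    match PySem.Str.pyGet? num 3 with    -- num[3]; 'none' is unreachable since len(num) ≥ 10
    | none => "Unknown"
    | some d =>
      if ¬ ('0' ≤ d ∧ d ≤ '9') then "Unknown"
      else
        let low := d ≤ '5'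
        if head = "981" ∨ (head = "980" ∧ low) then "AIRTEL"
        else if head = "701" ∨ (head = "700" ∧ low) then "JIO"
        else if head = "989" ∨ (head = "999" ∧ '4' ≤ d) then "VI"
        else if head = "944" ∨ (head = "945" ∧ low) then "BSNL"
        else "Unknown"

-- ===== PRECONDITION & SPEC =====
def Spec_detect_indian_operator (number : String) (out : String) : Prop := out = detect_indian_operator_alt number
instance (number : String) (out : String) : Decidable (Spec_detect_indian_operator number out) := by unfold Spec_detect_indian_operator; infer_instance

-- ===== CLAIM (what is proved, stated in full; the proofs are below) =====
def Claim_equal_detect_indian_operator : Prop := ∀ (number : String), Dom_detect_indian_operator number → Spec_detect_indian_operator number (detect_indian_operator number)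

-- ===== LEMMAS AND PROOFS =====
theorem pv_sw (s q : List Char) (h : s.length = 4) (hq : q.length = 4) :
    PySem.Chars.startswith s q = (s == q) := by
  rw [Bool.eq_iff_iff, PySem.Chars.startswith_iff, beq_iff_eq]
  constructor
  · intro hpre
    exact (List.IsPrefix.eq_of_length hpre (by omega)).symm
  · intro he; subst he; exact List.prefix_refl _

theorem pv_sw4 (a b c d p1 p2 p3 p4 : Char) :
    PySem.Chars.startswith [a, b, c, d] [p1, p2, p3, p4]
      = decide (a = p1 ∧ b = p2 ∧ c = p3 ∧ d = p4) := by
  rw [pv_sw [a,b,c,d] [p1,p2,p3,p4] rfl rfl]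
  simp [beq_eq_decide]

theorem pv_hdeq (hd : String) (a b c : Char) (hhd : hd.toList = [a, b, c])
    (q : String) (q1 q2 q3 : Char) (hq : q.toList = [q1, q2, q3]) :
    (hd = q) ↔ (a = q1 ∧ b = q2 ∧ c = q3) := by
  rw [String.ext_iff, hhd, hq]
  simp

theorem pv_ceq (x y : Char) : (x = y) ↔ (x.toNat = y.toNat) :=
  ⟨fun h => by rw [h], fun h => Char.ext (UInt32.toNat_inj.mp h)⟩
theorem pv_cle (x y : Char) : (x ≤ y) ↔ (x.toNat ≤ y.toNat) := by
  simp [Char.le_def, UInt32.le_iff_toNat_le]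

theorem pv_digit10 (d : Char) (h1 : '0' ≤ d) (h2 : d ≤ '9') :
    d = '0' ∨ d = '1' ∨ d = '2' ∨ d = '3' ∨ d = '4' ∨
    d = '5' ∨ d = '6' ∨ d = '7' ∨ d = '8' ∨ d = '9' := by
  simp only [pv_ceq, pv_cle, Char.reduceToNat] at *
  omega

theorem pv_chain10 (op : String) (d : Char) :
    (if d = '0' then some op else if d = '1' then some op else if d = '2' then some op else if d = '3' then some op else if d = '4' then some op else if d = '5' then some op else if d = '6' then some op else if d = '7' then some op else if d = '8' then some op else if d = '9' then some op else (none : Option String))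
      = if '0' ≤ d ∧ d ≤ '9' then some op else none := by
  by_cases hdig0 : '0' ≤ d ∧ d ≤ '9'
  · have h10 := pv_digit10 d (le_trans (by decide) hdig0.1) (le_trans hdig0.2 (by decide))
    rcases h10 with rfl|rfl|rfl|rfl|rfl|rfl|rfl|rfl|rfl|rfl <;> simp_all
  · have hne : ∀ x : Char, '0' ≤ x → x ≤ '9' → d ≠ x := by
      rintro x hx1 hx2 rfl; exact hdig0 ⟨hx1, hx2⟩
    simp [hdig0, hne '0' (by decide) (by decide), hne '1' (by decide) (by decide), hne '2' (by decide) (by decide), hne '3' (by decide) (by decide), hne '4' (by decide) (by decide), hne '5' (by decide) (by decide), hne '6' (by decide) (by decide), hne '7' (by decide) (by decide), hne '8' (by decide) (by decide), hne '9' (by decide) (by decide)]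

theorem pv_chain10J (op : String) (d : Char) :
    (if d = '1' then some op else if d = '0' then some op else if d = '2' then some op else if d = '3' then some op else if d = '4' then some op else if d = '5' then some op else if d = '6' then some op else if d = '7' then some op else if d = '8' then some op else if d = '9' then some op else (none : Option String))
      = if '0' ≤ d ∧ d ≤ '9' then some op else none := by
  by_cases hdig0 : '0' ≤ d ∧ d ≤ '9'
  · have h10 := pv_digit10 d (le_trans (by decide) hdig0.1) (le_trans hdig0.2 (by decide))
    rcases h10 with rfl|rfl|rfl|rfl|rfl|rfl|rfl|rfl|rfl|rfl <;> simp_all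
  · have hne : ∀ x : Char, '0' ≤ x → x ≤ '9' → d ≠ x := by
      rintro x hx1 hx2 rfl; exact hdig0 ⟨hx1, hx2⟩
    simp [hdig0, hne '1' (by decide) (by decide), hne '0' (by decide) (by decide), hne '2' (by decide) (by decide), hne '3' (by decide) (by decide), hne '4' (by decide) (by decide), hne '5' (by decide) (by decide), hne '6' (by decide) (by decide), hne '7' (by decide) (by decide), hne '8' (by decide) (by decide), hne '9' (by decide) (by decide)]

theorem pv_chain6 (op : String) (d : Char) :
    (if d = '0' then some op else if d = '1' then some op else if d = '2' then some op else if d = '3' then some op else if d = '4' then some op else if d = '5' then some op else (none : Option String))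
      = if '0' ≤ d ∧ d ≤ '5' then some op else none := by
  by_cases hdig0 : '0' ≤ d ∧ d ≤ '5'
  · have h10 := pv_digit10 d (le_trans (by decide) hdig0.1) (le_trans hdig0.2 (by decide))
    rcases h10 with rfl|rfl|rfl|rfl|rfl|rfl|rfl|rfl|rfl|rfl <;> simp_all
  · have hne : ∀ x : Char, '0' ≤ x → x ≤ '5' → d ≠ x := by
      rintro x hx1 hx2 rfl; exact hdig0 ⟨hx1, hx2⟩
    simp [hdig0, hne '0' (by decide) (by decide), hne '1' (by decide) (by decide), hne '2' (by decide) (by decide), hne '3' (by decide) (by decide), hne '4' (by decide) (by decide), hne '5' (by decide) (by decide)]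

theorem pv_chainHi (op : String) (d : Char) :
    (if d = '9' then some op else if d = '8' then some op else if d = '7' then some op else if d = '6' then some op else if d = '5' then some op else if d = '4' then some op else (none : Option String))
      = if '4' ≤ d ∧ d ≤ '9' then some op else none := by
  by_cases hdig0 : '4' ≤ d ∧ d ≤ '9'
  · have h10 := pv_digit10 d (le_trans (by decide) hdig0.1) (le_trans hdig0.2 (by decide))
    rcases h10 with rfl|rfl|rfl|rfl|rfl|rfl|rfl|rfl|rfl|rfl <;> simp_all
  · have hne : ∀ x : Char, '4' ≤ x → x ≤ '9' → d ≠ x := by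
      rintro x hx1 hx2 rfl; exact hdig0 ⟨hx1, hx2⟩
    simp [hdig0, hne '9' (by decide) (by decide), hne '8' (by decide) (by decide), hne '7' (by decide) (by decide), hne '6' (by decide) (by decide), hne '5' (by decide) (by decide), hne '4' (by decide) (by decide)]

set_option maxHeartbeats 1000000 in
theorem pv_airtel (ff : String) (a b c d : Char) (hff : ff.toList = [a, b, c, d]) :
    pvScanInner ff "AIRTEL" ["9810", "9811", "9812", "9813", "9814", "9815", "9816", "9817", "9818", "9819", "9800", "9801", "9802", "9803", "9804", "9805"]
      = if ((a = '9' ∧ b = '8' ∧ c = '1') ∧ ('0' ≤ d ∧ d ≤ '9')) ∨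
           ((a = '9' ∧ b = '8' ∧ c = '0') ∧ ('0' ≤ d ∧ d ≤ '5')) then some "AIRTEL" else none := by
  simp only [pvScanInner, PySem.Str.startswith_eq, String.reduceToList, hff, pv_sw4,
    decide_eq_true_eq]
  by_cases h1 : a = '9' ∧ b = '8' ∧ c = '1'
  · obtain ⟨rfl, rfl, rfl⟩ := h1
    simp [pv_chain10]
  · by_cases h2 : a = '9' ∧ b = '8' ∧ c = '0'
    · obtain ⟨rfl, rfl, rfl⟩ := h2
      simp [pv_chain6]
    · have k1 : ∀ x : Char, ¬(a = '9' ∧ b = '8' ∧ c = '1' ∧ d = x) :=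
        fun x h => h1 ⟨h.1, h.2.1, h.2.2.1⟩
      have k2 : ∀ x : Char, ¬(a = '9' ∧ b = '8' ∧ c = '0' ∧ d = x) :=
        fun x h => h2 ⟨h.1, h.2.1, h.2.2.1⟩
      simp [k1, k2, h1, h2]

set_option maxHeartbeats 1000000 in
theorem pv_jio (ff : String) (a b c d : Char) (hff : ff.toList = [a, b, c, d]) :
    pvScanInner ff "JIO" ["7011", "7010", "7012", "7013", "7014", "7015", "7016", "7017", "7018", "7019", "7000", "7001", "7002", "7003", "7004", "7005"]
      = if ((a = '7' ∧ b = '0' ∧ c = '1') ∧ ('0' ≤ d ∧ d ≤ '9')) ∨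
           ((a = '7' ∧ b = '0' ∧ c = '0') ∧ ('0' ≤ d ∧ d ≤ '5')) then some "JIO" else none := by
  simp only [pvScanInner, PySem.Str.startswith_eq, String.reduceToList, hff, pv_sw4,
    decide_eq_true_eq]
  by_cases h1 : a = '7' ∧ b = '0' ∧ c = '1'
  · obtain ⟨rfl, rfl, rfl⟩ := h1
    simp [pv_chain10J]
  · by_cases h2 : a = '7' ∧ b = '0' ∧ c = '0'
    · obtain ⟨rfl, rfl, rfl⟩ := h2
      simp [pv_chain6]
    · have k1 : ∀ x : Char, ¬(a = '7' ∧ b = '0' ∧ c = '1' ∧ d = x) :=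
        fun x h => h1 ⟨h.1, h.2.1, h.2.2.1⟩
      have k2 : ∀ x : Char, ¬(a = '7' ∧ b = '0' ∧ c = '0' ∧ d = x) :=
        fun x h => h2 ⟨h.1, h.2.1, h.2.2.1⟩
      simp [k1, k2, h1, h2]

set_option maxHeartbeats 1000000 in
theorem pv_vi (ff : String) (a b c d : Char) (hff : ff.toList = [a, b, c, d]) :
    pvScanInner ff "VI" ["9890", "9891", "9892", "9893", "9894", "9895", "9896", "9897", "9898", "9899", "9999", "9998", "9997", "9996", "9995", "9994"]
      = if ((a = '9' ∧ b = '8' ∧ c = '9') ∧ ('0' ≤ d ∧ d ≤ '9')) ∨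
           ((a = '9' ∧ b = '9' ∧ c = '9') ∧ ('4' ≤ d ∧ d ≤ '9')) then some "VI" else none := by
  simp only [pvScanInner, PySem.Str.startswith_eq, String.reduceToList, hff, pv_sw4,
    decide_eq_true_eq]
  by_cases h1 : a = '9' ∧ b = '8' ∧ c = '9'
  · obtain ⟨rfl, rfl, rfl⟩ := h1
    simp [pv_chain10]
  · by_cases h2 : a = '9' ∧ b = '9' ∧ c = '9'
    · obtain ⟨rfl, rfl, rfl⟩ := h2
      simp [pv_chainHi]
    · have k1 : ∀ x : Char, ¬(a = '9' ∧ b = '8' ∧ c = '9' ∧ d = x) :=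
        fun x h => h1 ⟨h.1, h.2.1, h.2.2.1⟩
      have k2 : ∀ x : Char, ¬(a = '9' ∧ b = '9' ∧ c = '9' ∧ d = x) :=
        fun x h => h2 ⟨h.1, h.2.1, h.2.2.1⟩
      simp [k1, k2, h1, h2]

set_option maxHeartbeats 1000000 in
theorem pv_bsnl (ff : String) (a b c d : Char) (hff : ff.toList = [a, b, c, d]) :
    pvScanInner ff "BSNL" ["9440", "9441", "9442", "9443", "9444", "9445", "9446", "9447", "9448", "9449", "9450", "9451", "9452", "9453", "9454", "9455"]
      = if ((a = '9' ∧ b = '4' ∧ c = '4') ∧ ('0' ≤ d ∧ d ≤ '9')) ∨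
           ((a = '9' ∧ b = '4' ∧ c = '5') ∧ ('0' ≤ d ∧ d ≤ '5')) then some "BSNL" else none := by
  simp only [pvScanInner, PySem.Str.startswith_eq, String.reduceToList, hff, pv_sw4,
    decide_eq_true_eq]
  by_cases h1 : a = '9' ∧ b = '4' ∧ c = '4'
  · obtain ⟨rfl, rfl, rfl⟩ := h1
    simp [pv_chain10]
  · by_cases h2 : a = '9' ∧ b = '4' ∧ c = '5'
    · obtain ⟨rfl, rfl, rfl⟩ := h2
      simp [pv_chain6]
    · have k1 : ∀ x : Char, ¬(a = '9' ∧ b = '4' ∧ c = '4' ∧ d = x) :=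
        fun x h => h1 ⟨h.1, h.2.1, h.2.2.1⟩
      have k2 : ∀ x : Char, ¬(a = '9' ∧ b = '4' ∧ c = '5' ∧ d = x) :=
        fun x h => h2 ⟨h.1, h.2.1, h.2.2.1⟩
      simp [k1, k2, h1, h2]

set_option maxHeartbeats 1000000 in
theorem pv_core (ff hd : String) (a b c d : Char)
    (hff : ff.toList = [a, b, c, d]) (hhd : hd.toList = [a, b, c]) :
    (match pvScanOuter ff pvOpPrefixes with | some op => op | none => "Unknown")
    = (if ¬ ('0' ≤ d ∧ d ≤ '9') then "Unknown"
       else if hd = "981" ∨ (hd = "980" ∧ d ≤ '5') then "AIRTEL"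
       else if hd = "701" ∨ (hd = "700" ∧ d ≤ '5') then "JIO"
       else if hd = "989" ∨ (hd = "999" ∧ '4' ≤ d) then "VI"
       else if hd = "944" ∨ (hd = "945" ∧ d ≤ '5') then "BSNL"
       else "Unknown") := by
  simp only [pv_hdeq hd a b c hhd "981" '9' '8' '1' (by decide),
      pv_hdeq hd a b c hhd "980" '9' '8' '0' (by decide),
      pv_hdeq hd a b c hhd "701" '7' '0' '1' (by decide),
      pv_hdeq hd a b c hhd "700" '7' '0' '0' (by decide),
      pv_hdeq hd a b c hhd "989" '9' '8' '9' (by decide),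
      pv_hdeq hd a b c hhd "999" '9' '9' '9' (by decide),
      pv_hdeq hd a b c hhd "944" '9' '4' '4' (by decide),
      pv_hdeq hd a b c hhd "945" '9' '4' '5' (by decide)]
  simp only [pvScanOuter, pvOpPrefixes,
    pv_airtel ff a b c d hff, pv_jio ff a b c d hff, pv_vi ff a b c d hff,
    pv_bsnl ff a b c d hff]
  by_cases hdig : '0' ≤ d ∧ d ≤ '9'
  ·
    by_cases t1 : a = '9' ∧ b = '8' ∧ c = '1'
    · obtain ⟨rfl, rfl, rfl⟩ := t1
      simp [hdig, hdig.1, hdig.2]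
      all_goals split_ifs <;> rfl
    ·
      by_cases t2 : a = '9' ∧ b = '8' ∧ c = '0'
      · obtain ⟨rfl, rfl, rfl⟩ := t2
        simp [hdig, hdig.1, hdig.2, t1]
        all_goals split_ifs <;> rfl
      ·
        by_cases t3 : a = '7' ∧ b = '0' ∧ c = '1'
        · obtain ⟨rfl, rfl, rfl⟩ := t3
          simp [hdig, hdig.1, hdig.2, t1, t2]
          all_goals split_ifs <;> rfl
        ·
          by_cases t4 : a = '7' ∧ b = '0' ∧ c = '0'
          · obtain ⟨rfl, rfl, rfl⟩ := t4
            simp [hdig, hdig.1, hdig.2, t1, t2, t3]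
            all_goals split_ifs <;> rfl
          ·
            by_cases t5 : a = '9' ∧ b = '8' ∧ c = '9'
            · obtain ⟨rfl, rfl, rfl⟩ := t5
              simp [hdig, hdig.1, hdig.2, t1, t2, t3, t4]
              all_goals split_ifs <;> rfl
            ·
              by_cases t6 : a = '9' ∧ b = '9' ∧ c = '9'
              · obtain ⟨rfl, rfl, rfl⟩ := t6
                simp [hdig, hdig.1, hdig.2, t1, t2, t3, t4, t5]
                all_goals split_ifs <;> rfl
              ·
                by_cases t7 : a = '9' ∧ b = '4' ∧ c = '4'
                · obtain ⟨rfl, rfl, rfl⟩ := t7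
                  simp [hdig, hdig.1, hdig.2, t1, t2, t3, t4, t5, t6]
                  all_goals split_ifs <;> rfl
                ·
                  by_cases t8 : a = '9' ∧ b = '4' ∧ c = '5'
                  · obtain ⟨rfl, rfl, rfl⟩ := t8
                    simp [hdig, hdig.1, hdig.2, t1, t2, t3, t4, t5, t6, t7]
                    all_goals split_ifs <;> rfl
                  · simp [hdig, t1, t2, t3, t4, t5, t6, t7, t8]
  · have f2 : ¬('0' ≤ d ∧ d ≤ '5') := fun h => hdig ⟨h.1, le_trans h.2 (by decide)⟩
    have f3 : ¬('4' ≤ d ∧ d ≤ '9') := fun h => hdig ⟨le_trans (by decide) h.1, h.2⟩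
    simp [hdig, f2, f3]

theorem pv_main (number : String) :
    detect_indian_operator number = detect_indian_operator_alt number := by
  unfold detect_indian_operator detect_indian_operator_alt
  by_cases hlt : PySem.Str.len (PySem.Str.replace (PySem.Str.replace number "+91" "") "91" "") < 10
  · simp only [hlt, if_pos]
  · simp only [hlt, if_false]
    set num := PySem.Str.replace (PySem.Str.replace number "+91" "") "91" "" with hnum
    have hlen : 10 ≤ num.toList.length := by
      simp only [PySem.Str.len_eq] at hlt
      omega
    rcases hcs : num.toList with _ | ⟨a, _ | ⟨b, _ | ⟨c, _ | ⟨d, rest⟩⟩⟩⟩ <;>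
      try (rw [hcs] at hlen; simp at hlen)
    have hff : (PySem.Str.slice num none (some 4)).toList = [a, b, c, d] := by
      simp only [PySem.Str.toList_slice, PySem.Chars.slice_eq_listSlice, hcs,
        PySem.List.slice_to _ (by norm_num : (0:Int) ≤ 4)]
      rfl
    have hhd : (PySem.Str.slice num none (some 3)).toList = [a, b, c] := by
      simp only [PySem.Str.toList_slice, PySem.Chars.slice_eq_listSlice, hcs,
        PySem.List.slice_to _ (by norm_num : (0:Int) ≤ 3)]
      rfl
    have hd3 : PySem.Str.pyGet? num 3 = some d := by
      simp only [PySem.Str.pyGet?_eq, PySem.Chars.pyGet?_eq_listPyGet?, hcs]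
      simp [PySem.List.pyGet?, PySem.List.pyIdx?,
        show (3:Int) ≤ (rest.length:Int) + 1 + 1 + 1 by omega]
    rw [hd3]
    exact pv_core (PySem.Str.slice num none (some 4)) (PySem.Str.slice num none (some 3))
      a b c d hff hhd

-- ===== VERDICT (by name: the statement is the Claim_ definition above) =====
theorem detect_indian_operator_spec : Claim_equal_detect_indian_operator := by
  intro number _
  unfold Spec_detect_indian_operator
  exact pv_main number
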